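-- pv_equiv track=rewrite | github.com/vuorenkoski/AQC | performance_measurement/graphs.py | graph_multiple_cycle
-- ===== SOURCE A (Python) =====
-- def graph_tree(vertices):
--     # balanced binary tree
--     E = []
--     if vertices<2:
--         return E
--     j = 1
--     k = 0
--     for i in range(vertices):
--         if j+i*2<vertices:
--             E.append((i,j+i*2))
--         if j+i*2+1<vertices:
--             E.append((i,j+i*2+1))
--         k += 1
--         if k==j:
--             k = 0
--             j *= j
--     return E
--
-- def graph_multiple_cycle(vertices):
--     # tree graph, but edge from every second last level leaf to first vertex
--     if vertices<5:
--         return []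
--     E = graph_tree(vertices)
--     j = 1
--     k = 0
--     while k+j<vertices:
--         k += j
--         j *= 2
--     for i in range(k,vertices,2):
--         E.append((i,0))
--     if vertices==5:
--         E.append((4,0))
--     return E
-- ===== SOURCE B (Python) =====
-- def graph_multiple_cycle(vertices):
--     # tree graph, but edge from every second last level leaf to first vertex
--     if vertices < 5:
--         return []
--     E = []
--     level = [0]
--     while True:
--         nxt = []
--         for u in level:
--             for c in (2 * u + 1, 2 * u + 2):
--                 if c < vertices:
--                     E.append((u, c))
--                     nxt.append(c)
--         if not nxt:
--             break
--         level = nxt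
--     k = level[0]
--     E += [(i, 0) for i in range(k, vertices, 2)]
--     if vertices == 5:
--         E.append((4, 0))
--     return E
-- ===== Notes on version B (the rewrite author's own statement) =====
-- stated objective: alternative
-- what changed: B builds the tree edges by an explicit breadth-first traversal with a frontier list (pop a level, emit edges to its children, recurse on the child frontier) and reads the cycle start k off as the first vertex of the deepest frontier, instead of A's single indexed loop with (j,k) counter bookkeeping plus a separate doubling while-loop for k.
import Mathlib
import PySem

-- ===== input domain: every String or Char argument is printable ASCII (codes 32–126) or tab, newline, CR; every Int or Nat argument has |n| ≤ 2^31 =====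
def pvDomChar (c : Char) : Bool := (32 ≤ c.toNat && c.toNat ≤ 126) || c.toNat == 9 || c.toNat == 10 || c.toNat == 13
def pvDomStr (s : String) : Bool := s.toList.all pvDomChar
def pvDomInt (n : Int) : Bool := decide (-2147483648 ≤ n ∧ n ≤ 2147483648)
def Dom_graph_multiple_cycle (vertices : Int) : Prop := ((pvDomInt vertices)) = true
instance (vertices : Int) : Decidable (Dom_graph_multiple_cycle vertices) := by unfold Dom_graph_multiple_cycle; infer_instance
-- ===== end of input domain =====

-- B builds the tree edges by a breadth-first traversal with an explicit frontier list
-- and reads the cycle start off the deepest frontier, instead of A's indexed loop with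
-- (j,k) counter bookkeeping plus a separate doubling while-loop (objective: alternative).

-- ===== PORT A =====
-- one iteration of the for-loop body of graph_tree (state = (E, j, k))
def treeBody (vertices : Int) (st : List (Int × Int) × Int × Int) (i : Int) :
    List (Int × Int) × Int × Int :=
  let E := st.1
  let j := st.2.1
  let k := st.2.2
  let E := if j + i * 2 < vertices then E ++ [(i, j + i * 2)] else E
  let E := if j + i * 2 + 1 < vertices then E ++ [(i, j + i * 2 + 1)] else E
  let k := k + 1
  if k == j then (E, j * j, 0) else (E, j, k)

def graph_tree (vertices : Int) : List (Int × Int) :=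
  if vertices < 2 then []
  else ((PySem.List.pyRange 0 vertices 1).foldl (treeBody vertices) ([], 1, 0)).1

-- the 'while k+j<vertices' loop of A; the 0 < j conjunct is only a totality guard
def cycleLoop (vertices k j : Int) : Int :=
  if h : k + j < vertices ∧ 0 < j then cycleLoop vertices (k + j) (j * 2) else k
termination_by (vertices - k).toNat
decreasing_by omega

def graph_multiple_cycle (vertices : Int) : List (Int × Int) :=
  if vertices < 5 then []
  else
    let E := graph_tree vertices
    let k := cycleLoop vertices 0 1
    let E := (PySem.List.pyRange k vertices 2).foldl (fun E i => E ++ [(i, (0 : Int))]) E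
    if vertices == 5 then E ++ [((4 : Int), (0 : Int))] else E

-- ===== PORT B =====
-- one vertex u of the current frontier: emit edges to its children < vertices and
-- collect those children into the next frontier (state = (E, nxt))
def levelBody (vertices : Int) (p : List (Int × Int) × List Int) (u : Int) :
    List (Int × Int) × List Int :=
  let p := if 2 * u + 1 < vertices then (p.1 ++ [(u, 2 * u + 1)], p.2 ++ [2 * u + 1]) else p
  if 2 * u + 2 < vertices then (p.1 ++ [(u, 2 * u + 2)], p.2 ++ [2 * u + 2]) else p

-- the 'while True' BFS loop; fuel only makes the recursion total (vertices.toNat is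
-- proved sufficient below, so the fuel-0 branch is never reached on the actual call)
def bfsLoop (vertices : Int) : Nat → List (Int × Int) → List Int → List (Int × Int) × List Int
  | 0, E, level => (E, level)
  | fuel + 1, E, level =>
    let p := level.foldl (levelBody vertices) (E, [])
    if p.2 = [] then (p.1, level) else bfsLoop vertices fuel p.1 p.2

def graph_multiple_cycle_alt (vertices : Int) : List (Int × Int) :=
  if vertices < 5 then []
  else
    let p := bfsLoop vertices vertices.toNat [] [0]
    let k := p.2.headD 0   -- level[0]; the frontier is never empty (proved below)
    let E := p.1 ++ (PySem.List.pyRange k vertices 2).map (fun i => (i, (0 : Int)))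
    if vertices == 5 then E ++ [((4 : Int), (0 : Int))] else E

-- ===== PRECONDITION & SPEC =====
def Spec_graph_multiple_cycle (vertices : Int) (out : List (Int × Int)) : Prop := out = graph_multiple_cycle_alt vertices
instance (vertices : Int) (out : List (Int × Int)) : Decidable (Spec_graph_multiple_cycle vertices out) := by unfold Spec_graph_multiple_cycle; infer_instance

-- ===== CLAIM (what is proved, stated in full; the proofs are below) =====
def Claim_equal_graph_multiple_cycle : Prop := ∀ (vertices : Int), Dom_graph_multiple_cycle vertices → Spec_graph_multiple_cycle vertices (graph_multiple_cycle vertices)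

-- ===== LEMMAS AND PROOFS =====

lemma floordiv_two_mul (m : Int) : PySem.Int.floordiv (2 * m) 2 = m := by
  rw [PySem.Int.floordiv_eq_ediv_of_pos (by norm_num)]; omega

lemma floordiv_two_mul_add_one (m : Int) : PySem.Int.floordiv (2 * m + 1) 2 = m := by
  rw [PySem.Int.floordiv_eq_ediv_of_pos (by norm_num)]; omega

-- loop invariant of A's graph_tree: after m iterations the state is
-- (the child-indexed edge list for children < min (2m+1) v, 1, 0)
lemma tree_inv (v : Int) (m : Nat) :
    (PySem.List.pyRange 0 (m : Int) 1).foldl (treeBody v) ([], 1, 0)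
      = ((PySem.List.pyRange 1 (min (2 * (m : Int) + 1) v) 1).map
          (fun c => (PySem.Int.floordiv (c - 1) 2, c)), 1, 0) := by
  induction m with
  | zero =>
      rw [PySem.List.pyRange_one_eq_nil (a := 1) (by omega),
          PySem.List.pyRange_one_eq_nil (a := 0) (by omega)]
      simp
  | succ m ih =>
      have hcast : ((m + 1 : Nat) : Int) = (m : Int) + 1 := by push_cast; ring
      rw [hcast, PySem.List.pyRange_one_succ_right (show (0:Int) ≤ (m:Int) by omega),
          List.foldl_append, ih]
      simp only [List.foldl_cons, List.foldl_nil]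
      unfold treeBody
      by_cases h1 : (1 : Int) + (m : Int) * 2 < v
      · by_cases h2 : (1 : Int) + (m : Int) * 2 + 1 < v
        · have e0 : min (2 * (m : Int) + 1) v = 2 * (m : Int) + 1 := by omega
          have e1 : min (2 * ((m : Int) + 1) + 1) v = (2 * (m : Int) + 1) + 1 + 1 := by omega
          rw [e0, e1,
              PySem.List.pyRange_one_succ_right (show (1:Int) ≤ 2 * (m:Int) + 1 + 1 by omega),
              PySem.List.pyRange_one_succ_right (show (1:Int) ≤ 2 * (m:Int) + 1 by omega)]
          simp only [if_pos h1, if_pos h2, zero_add, beq_self_eq_true, if_true, one_mul,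
            List.map_append, List.map_cons, List.map_nil]
          rw [show (2 * (m:Int) + 1 - 1) = 2 * (m:Int) from by ring, floordiv_two_mul,
              show (2 * (m:Int) + 1 + 1 - 1) = 2 * (m:Int) + 1 from by ring,
              floordiv_two_mul_add_one,
              show ((1:Int) + (m:Int) * 2) = 2 * (m:Int) + 1 from by ring]
        · have e0 : min (2 * (m : Int) + 1) v = 2 * (m : Int) + 1 := by omega
          have e1 : min (2 * ((m : Int) + 1) + 1) v = (2 * (m : Int) + 1) + 1 := by omega
          rw [e0, e1,
              PySem.List.pyRange_one_succ_right (show (1:Int) ≤ 2 * (m:Int) + 1 by omega)]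
          simp only [if_pos h1, if_neg h2, zero_add, beq_self_eq_true, if_true, one_mul,
            List.map_append, List.map_cons, List.map_nil]
          rw [show (2 * (m:Int) + 1 - 1) = 2 * (m:Int) from by ring, floordiv_two_mul,
              show ((1:Int) + (m:Int) * 2) = 2 * (m:Int) + 1 from by ring]
      · have h2 : ¬ ((1 : Int) + (m : Int) * 2 + 1 < v) := by omega
        have e : min (2 * ((m : Int) + 1) + 1) v = min (2 * (m : Int) + 1) v := by omega
        simp only [if_neg h1, if_neg h2, zero_add, beq_self_eq_true, if_true, one_mul, e]

lemma graph_tree_eq (v : Int) (hv : 2 ≤ v) :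
    graph_tree v = (PySem.List.pyRange 1 v 1).map
      (fun c => (PySem.Int.floordiv (c - 1) 2, c)) := by
  unfold graph_tree
  rw [if_neg (by omega)]
  have hv0 : ((v.toNat : Nat) : Int) = v := by omega
  rw [← hv0, tree_inv, min_eq_right (show ((v.toNat : Nat) : Int) ≤ 2 * ((v.toNat : Nat) : Int) + 1 by omega)]

-- proof-side abstraction of the frontier start: iterate s ↦ 2s+1 while 2s+1 < v
def climb (v s : Int) : Int :=
  if h : 2 * s + 1 < v ∧ 0 ≤ s then climb v (2 * s + 1) else s
termination_by (v - s).toNat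
decreasing_by omega

lemma climb_bounds (v s : Int) (h0 : 0 ≤ s) (hv : s < v) : 0 ≤ climb v s ∧ climb v s < v := by
  rw [climb]
  by_cases h : 2 * s + 1 < v ∧ 0 ≤ s
  · rw [dif_pos h]
    exact climb_bounds v (2 * s + 1) (by omega) (by omega)
  · rw [dif_neg h]
    exact ⟨h0, hv⟩
termination_by (v - s).toNat
decreasing_by omega

-- A's doubling while-loop, started with j = k + 1, keeps j = k + 1 and is climb
lemma cycleLoop_eq_climb (v s : Int) (h0 : 0 ≤ s) : cycleLoop v s (s + 1) = climb v s := by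
  rw [cycleLoop, climb]
  by_cases h : 2 * s + 1 < v
  · rw [dif_pos (show s + (s + 1) < v ∧ 0 < s + 1 by omega), dif_pos ⟨h, h0⟩]
    have e1 : s + (s + 1) = 2 * s + 1 := by ring
    have e2 : (s + 1) * 2 = (2 * s + 1) + 1 := by ring
    rw [e1, e2]
    exact cycleLoop_eq_climb v (2 * s + 1) (by omega)
  · rw [dif_neg (show ¬ (s + (s + 1) < v ∧ 0 < s + 1) by omega), dif_neg (by omega)]
termination_by (v - s).toNat
decreasing_by omega

-- B's frontier fold on a contiguous range [s, s+n) emits the child-order edges and the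
-- contiguous child range [2s+1, min (2(s+n)+1) v)
lemma level_fold (v : Int) (n : Nat) : ∀ (s : Int) (A : List (Int × Int)) (B : List Int),
    0 ≤ s →
    (PySem.List.pyRange s (s + (n : Int)) 1).foldl (levelBody v) (A, B) =
      (A ++ (PySem.List.pyRange (2 * s + 1) (min (2 * (s + (n : Int)) + 1) v) 1).map
        (fun c => (PySem.Int.floordiv (c - 1) 2, c)),
       B ++ PySem.List.pyRange (2 * s + 1) (min (2 * (s + (n : Int)) + 1) v) 1) := by
  induction n with
  | zero =>
      intro s A B h0
      simp only [Nat.cast_zero, add_zero]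
      rw [PySem.List.pyRange_one_eq_nil (le_refl s),
          PySem.List.pyRange_one_eq_nil (min_le_left (2 * s + 1) v)]
      simp
  | succ n ih =>
      intro s A B h0
      have hc : ((n + 1 : Nat) : Int) = (n : Int) + 1 := by push_cast; ring
      rw [hc, show s + ((n : Int) + 1) = (s + (n : Int)) + 1 from by ring,
          PySem.List.pyRange_one_succ_right (show s ≤ s + (n : Int) by omega),
          List.foldl_append, ih s A B h0]
      simp only [List.foldl_cons, List.foldl_nil]
      unfold levelBody
      by_cases h1 : 2 * (s + (n : Int)) + 1 < v
      · by_cases h2 : 2 * (s + (n : Int)) + 2 < v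
        · have e0 : min (2 * (s + (n : Int)) + 1) v = 2 * (s + (n : Int)) + 1 := by omega
          have e1 : min (2 * ((s + (n : Int)) + 1) + 1) v
              = ((2 * (s + (n : Int)) + 1) + 1) + 1 := by omega
          rw [e0, e1,
              PySem.List.pyRange_one_succ_right (show 2 * s + 1 ≤ 2 * (s + (n : Int)) + 1 + 1 by omega),
              PySem.List.pyRange_one_succ_right (show 2 * s + 1 ≤ 2 * (s + (n : Int)) + 1 by omega)]
          simp only [if_pos h1, if_pos h2, List.map_append, List.map_cons, List.map_nil,
            List.append_assoc, List.cons_append, List.nil_append]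
          rw [show (2 * (s + (n : Int)) + 1 - 1) = 2 * (s + (n : Int)) from by ring,
              floordiv_two_mul,
              show (2 * (s + (n : Int)) + 1 + 1 - 1) = 2 * (s + (n : Int)) + 1 from by ring,
              floordiv_two_mul_add_one,
              show (2 * (s + (n : Int)) + 2) = 2 * (s + (n : Int)) + 1 + 1 from by ring]
        · have e0 : min (2 * (s + (n : Int)) + 1) v = 2 * (s + (n : Int)) + 1 := by omega
          have e1 : min (2 * ((s + (n : Int)) + 1) + 1) v = (2 * (s + (n : Int)) + 1) + 1 := by omega
          rw [e0, e1,
              PySem.List.pyRange_one_succ_right (show 2 * s + 1 ≤ 2 * (s + (n : Int)) + 1 by omega)]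
          simp only [if_pos h1, if_neg h2, List.map_append, List.map_cons, List.map_nil,
            List.append_assoc, List.cons_append, List.nil_append]
          rw [show (2 * (s + (n : Int)) + 1 - 1) = 2 * (s + (n : Int)) from by ring,
              floordiv_two_mul]
      · have h2 : ¬ (2 * (s + (n : Int)) + 2 < v) := by omega
        have e : min (2 * ((s + (n : Int)) + 1) + 1) v = min (2 * (s + (n : Int)) + 1) v := by omega
        simp only [if_neg h1, if_neg h2, e]

-- the BFS loop, started on the frontier [s, min (2s+1) v), appends exactly the tree
-- edges for all children in [2s+1, v) and ends with the frontier starting at climb v s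
lemma bfs_eq (v : Int) : ∀ (fuel : Nat) (s : Int) (E : List (Int × Int)),
    0 ≤ s → s < v → (v - s).toNat ≤ fuel →
    bfsLoop v fuel E (PySem.List.pyRange s (min (2 * s + 1) v) 1) =
      (E ++ (PySem.List.pyRange (2 * s + 1) v 1).map
        (fun c => (PySem.Int.floordiv (c - 1) 2, c)),
       PySem.List.pyRange (climb v s) (min (2 * (climb v s) + 1) v) 1) := by
  intro fuel
  induction fuel with
  | zero => intro s E h0 hv hf; omega
  | succ fuel ih =>
      intro s E h0 hv hf
      have hse : s + (((min (2 * s + 1) v - s).toNat : Nat) : Int) = min (2 * s + 1) v := by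
        omega
      simp only [bfsLoop]
      rw [← hse, level_fold v (min (2 * s + 1) v - s).toNat s E [] h0, hse]
      simp only [List.nil_append]
      by_cases hlt : 2 * s + 1 < v
      · have he : min (2 * s + 1) v = 2 * s + 1 := by omega
        rw [he]
        have hcons : PySem.List.pyRange (2 * s + 1) (min (2 * (2 * s + 1) + 1) v) 1
            = (2 * s + 1) :: PySem.List.pyRange (2 * s + 1 + 1) (min (2 * (2 * s + 1) + 1) v) 1 :=
          PySem.List.pyRange_one_cons (by omega)
        have hne : PySem.List.pyRange (2 * s + 1) (min (2 * (2 * s + 1) + 1) v) 1 ≠ [] := by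
          rw [hcons]; exact List.cons_ne_nil _ _
        rw [if_neg hne, ih (2 * s + 1) _ (by omega) (by omega) (by omega)]
        have hclimb : climb v s = climb v (2 * s + 1) := by
          rw [climb, dif_pos ⟨hlt, h0⟩]
        rw [hclimb, List.append_assoc, ← List.map_append]
        by_cases hb : 2 * (2 * s + 1) + 1 ≤ v
        · rw [min_eq_left hb,
              ← PySem.List.pyRange_one_append (2 * s + 1) (2 * (2 * s + 1) + 1) v (by omega) hb]
        · rw [min_eq_right (by omega),
              PySem.List.pyRange_one_eq_nil (a := 2 * (2 * s + 1) + 1) (by omega),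
              List.append_nil]
      · have he : min (2 * s + 1) v = v := by omega
        rw [he]
        have hnil : PySem.List.pyRange (2 * s + 1) (min (2 * v + 1) v) 1 = [] :=
          PySem.List.pyRange_one_eq_nil (by omega)
        have hnil2 : PySem.List.pyRange (2 * s + 1) v 1 = [] :=
          PySem.List.pyRange_one_eq_nil (by omega)
        rw [hnil, if_pos rfl]
        have hclimb : climb v s = s := by
          rw [climb, dif_neg (by omega)]
        rw [hclimb, hnil2, he]

-- ===== VERDICT (by name: the statement is the Claim_ definition above) =====
theorem graph_multiple_cycle_spec : Claim_equal_graph_multiple_cycle := by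
  intro v _
  unfold Spec_graph_multiple_cycle graph_multiple_cycle graph_multiple_cycle_alt
  by_cases h5 : v < 5
  · rw [if_pos h5, if_pos h5]
  · rw [if_neg h5, if_neg h5]
    have hv5 : 5 ≤ v := by omega
    have hinit : ([(0 : Int)] : List Int) = PySem.List.pyRange 0 (min (2 * 0 + 1) v) 1 := by
      rw [show min (2 * (0 : Int) + 1) v = 0 + 1 by omega, PySem.List.pyRange_one_singleton]
    rw [hinit, bfs_eq v v.toNat 0 [] (le_refl 0) (by omega) (by omega)]
    obtain ⟨hK0, hKv⟩ := climb_bounds v 0 (le_refl 0) (by omega)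
    rw [PySem.List.pyRange_one_cons (show climb v 0 < min (2 * (climb v 0) + 1) v by omega)]
    have hcyc : cycleLoop v 0 1 = climb v 0 := by
      have := cycleLoop_eq_climb v 0 (le_refl 0)
      rwa [show (0 : Int) + 1 = 1 by norm_num] at this
    rw [graph_tree_eq v (by omega), hcyc]
    simp only [List.headD_cons, List.nil_append,
      PySem.List.foldl_append_singleton_eq_map,
      show (2 : Int) * 0 + 1 = 1 from by norm_num]
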